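-- pv_equiv track=rewrite | github.com/20Alex16/enemy_AI | matrix1.py | getBestRoom
-- ===== SOURCE A (Python) =====
-- def getScore(width, height):
--     x = min(width, height)
--     y = max(width, height)
--     return x**3 + y
--
-- def getBestRoom(mat, nrLines, nrCols, line, col):
--     bestScore = None
--     room = None
--     maxLine = nrLines
--     for crtCol in range(col, nrCols):
--         if mat[line][crtCol] != 0:
--             break
--         else:
--             crtLine = line
--             while crtLine < maxLine and mat[crtLine][crtCol] == 0:
--                 crtLine += 1
--             maxLine = crtLine
--             score = getScore(crtLine - line, crtCol - col + 1)
--             if bestScore is None or score > bestScore: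
--                 bestScore = score
--                 room = (line, col, crtLine - 1, crtCol)
--     return room, bestScore
-- ===== SOURCE B (Python) =====
-- def getScore(width, height):
--     x = min(width, height)
--     y = max(width, height)
--     return x**3 + y
--
-- def getBestRoom(mat, nrLines, nrCols, line, col):
--     # Row-major (transposed) algorithm: instead of scanning DOWN each column,
--     # measure the zero-run WIDTH of each successive row, fold those widths into
--     # a nonincreasing prefix-minimum profile, and read the reachable depth for
--     # each width off that profile with a single backward-moving pointer.
--     def rowRun(r):
--         c = col
--         while c < nrCols and mat[r][c] == 0:
--             c += 1
--         return c - col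
--
--     if col >= nrCols:
--         return None, None
--     W = rowRun(line)              # number of columns the search can cover
--     runs = []                     # zero-run widths of rows line, line+1, ...
--     r = line
--     while r < nrLines:
--         u = rowRun(r)
--         if u == 0:
--             break
--         runs.append(u)
--         r += 1
--     pm = []                       # prefix minima of runs (nonincreasing)
--     m = None
--     for u in runs:
--         m = u if m is None else min(m, u)
--         pm.append(m)
--     room = None
--     best = None
--     d = len(pm)                   # depth reachable at the current width
--     for w in range(1, W + 1):
--         while d > 0 and pm[d - 1] < w:
--             d -= 1
--         s = getScore(d, w)
--         if best is None or s > best: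
--             best = s
--             room = (line, col, line + d - 1, col + w - 1)
--     return room, best
-- ===== Notes on version B (the rewrite author's own statement) =====
-- stated objective: alternative
-- what changed: A scans column by column, re-scanning DOWN each column under a running height cap; B transposes the problem: it measures the zero-run WIDTH of each successive row, folds those widths into a nonincreasing prefix-minimum profile, and then reads the reachable depth for every candidate width off that profile with a single backward-moving two-pointer - no downward per-column scan exists in B.
-- outside the precondition, e.g. on getBestRoom([[1]], 5, 1, 0, 0): A returns (None, None), B returns (None, None); on getBestRoom([[0]], 1, 1, -1, 0): A returns ((-1, 0, 0, 0), 3), B returns ((-1, 0, 0, 0), 3)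
import Mathlib
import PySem

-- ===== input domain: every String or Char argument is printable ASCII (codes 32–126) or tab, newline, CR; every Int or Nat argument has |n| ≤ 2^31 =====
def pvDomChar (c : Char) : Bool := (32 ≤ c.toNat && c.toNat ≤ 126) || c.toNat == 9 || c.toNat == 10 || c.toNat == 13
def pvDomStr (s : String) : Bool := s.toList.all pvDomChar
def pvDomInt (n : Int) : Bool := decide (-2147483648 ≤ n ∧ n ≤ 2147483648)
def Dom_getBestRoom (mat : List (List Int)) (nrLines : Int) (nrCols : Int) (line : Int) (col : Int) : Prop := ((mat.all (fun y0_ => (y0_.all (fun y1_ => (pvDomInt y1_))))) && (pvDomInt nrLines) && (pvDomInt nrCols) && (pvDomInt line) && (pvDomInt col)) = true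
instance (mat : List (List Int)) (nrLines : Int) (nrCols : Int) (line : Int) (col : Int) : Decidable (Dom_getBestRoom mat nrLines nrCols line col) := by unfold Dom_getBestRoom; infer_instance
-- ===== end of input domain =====

-- B replaces A's column-by-column downward scans (with a running height cap) by a transposed,
-- row-major algorithm: per-row zero-run widths, their prefix-minimum profile, and a backward
-- two-pointer reading the depth for each width; objective: alternative (same asymptotic cost).


-- ===== PORT A =====
-- shared module helper getScore(width, height)
def getScoreL (width height : Int) : Int := (min width height) ^ 3 + max width height

-- mat[r][c]; inside Pre_ both indices are in range (default 1 is never reached there)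
def cell0 (mat : List (List Int)) (r c : Int) : Int :=
  (PySem.List.pyGet? ((PySem.List.pyGet? mat r).getD []) c).getD 1

-- A's inner 'while crtLine < maxLine and mat[crtLine][crtCol] == 0: crtLine += 1';
-- the fuel (cap - r).toNat is exactly the guard 'crtLine < maxLine' made structural
def scanDownGo (mat : List (List Int)) (c : Int) : Nat → Int → Int
  | 0, r => r
  | n + 1, r => if cell0 mat r c = 0 then scanDownGo mat c n (r + 1) else r

def scanDown (mat : List (List Int)) (c cap r : Int) : Int :=
  scanDownGo mat c (cap - r).toNat r

def loopA (mat : List (List Int)) (line col : Int) :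
    List Int → Int → Option Int → Option (Int × Int × Int × Int) →
    (Option (Int × Int × Int × Int)) × Option Int
  | [], _, best, room => (room, best)
  | c :: rest, maxLine, best, room =>
    if cell0 mat line c ≠ 0 then (room, best)
    else
      let crtLine := scanDown mat c maxLine line
      let score := getScoreL (crtLine - line) (c - col + 1)
      if (match best with | none => true | some b => decide (score > b)) then
        loopA mat line col rest crtLine (some score) (some (line, col, crtLine - 1, c))
      else
        loopA mat line col rest crtLine best room

def getBestRoom (mat : List (List Int)) (nrLines : Int) (nrCols : Int) (line : Int) (col : Int) : (Option (Int × Int × Int × Int)) × Option Int :=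
  loopA mat line col (PySem.List.pyRange col nrCols 1) nrLines none none

-- ===== PORT B =====
-- Source B helper rowRun(r): 'c = col; while c < nrCols and mat[r][c] == 0: c += 1; return c - col'
-- the fuel (nrCols - c).toNat is exactly the guard 'c < nrCols' made structural
def rowRunGo (mat : List (List Int)) (r : Int) : Nat → Int → Int
  | 0, c => c
  | n + 1, c => if cell0 mat r c = 0 then rowRunGo mat r n (c + 1) else c

def rowRun (mat : List (List Int)) (nrCols col r : Int) : Int :=
  rowRunGo mat r (nrCols - col).toNat col - col

-- 'while r < nrLines: u = rowRun(r); if u == 0: break; runs.append(u); r += 1';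
-- the fuel (nrLines - r).toNat is exactly the guard 'r < nrLines' made structural
def collectRuns (mat : List (List Int)) (nrCols col : Int) : Nat → Int → List Int
  | 0, _ => []
  | n + 1, r =>
    let u := rowRun mat nrCols col r
    if u = 0 then [] else u :: collectRuns mat nrCols col n (r + 1)

-- 'for u in runs: m = u if m is None else min(m, u); pm.append(m)'
def buildPM : List Int → Option Int → List Int
  | [], _ => []
  | u :: t, m =>
    let m' := match m with | none => u | some mv => min mv u
    m' :: buildPM t (some m')

-- 'while d > 0 and pm[d-1] < w: d -= 1'; the fuel d.toNat is the guard '0 < d' made structural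
def shrinkGo (pm : List Int) (w : Int) : Nat → Int → Int
  | 0, d => d
  | n + 1, d =>
    if 0 < d ∧ (PySem.List.pyGet? pm (d - 1)).getD 0 < w then shrinkGo pm w n (d - 1) else d

def shrink (pm : List Int) (w d : Int) : Int :=
  shrinkGo pm w d.toNat d

-- 'for w in range(1, W+1): ...'
def loopB (line col : Int) (pm : List Int) :
    List Int → Int → Option Int → Option (Int × Int × Int × Int) →
    (Option (Int × Int × Int × Int)) × Option Int
  | [], _, best, room => (room, best)
  | w :: ws, d, best, room =>
    let d' := shrink pm w d
    let s := getScoreL d' w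
    if (match best with | none => true | some b => decide (s > b)) then
      loopB line col pm ws d' (some s) (some (line, col, line + d' - 1, col + w - 1))
    else
      loopB line col pm ws d' best room

def getBestRoom_alt (mat : List (List Int)) (nrLines : Int) (nrCols : Int) (line : Int) (col : Int) : (Option (Int × Int × Int × Int)) × Option Int :=
  if col ≥ nrCols then (none, none)
  else
    let W := rowRun mat nrCols col line
    let runs := collectRuns mat nrCols col (nrLines - line).toNat line
    let pm := buildPM runs none
    loopB line col pm (PySem.List.pyRange 1 (W + 1) 1) (pm.length : Int) none none

-- ===== PRECONDITION & SPEC =====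
-- Pre_ is a closed-form shape condition making every element access of both programs in range with
-- nonnegative indices; it excludes inputs on which A raises IndexError, and (stated narrowing) also
-- some inputs where A still returns only because the loop breaks or the cap stops before the
-- out-of-range or negative-wraparound access would happen — see the cites in claim.json.
def Pre_getBestRoom (mat : List (List Int)) (nrLines : Int) (nrCols : Int) (line : Int) (col : Int) : Prop :=
  col < nrCols →
    (0 ≤ line ∧ (line : Int) < (mat.length : Int) ∧ 0 ≤ col ∧ nrLines ≤ (mat.length : Int) ∧
      ∀ row ∈ mat, nrCols ≤ (row.length : Int))
instance (mat : List (List Int)) (nrLines : Int) (nrCols : Int) (line : Int) (col : Int) : Decidable (Pre_getBestRoom mat nrLines nrCols line col) := by unfold Pre_getBestRoom; infer_instance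

def pvWitness_getBestRoom : List (List Int) × Int × Int × Int × Int := ([[0, 0], [0, 1]], 2, 2, 0, 0)

def Spec_getBestRoom (mat : List (List Int)) (nrLines : Int) (nrCols : Int) (line : Int) (col : Int) (out : (Option (Int × Int × Int × Int)) × Option Int) : Prop := out = getBestRoom_alt mat nrLines nrCols line col
instance (mat : List (List Int)) (nrLines : Int) (nrCols : Int) (line : Int) (col : Int) (out : (Option (Int × Int × Int × Int)) × Option Int) : Decidable (Spec_getBestRoom mat nrLines nrCols line col out) := by unfold Spec_getBestRoom; infer_instance

-- ===== CLAIM (what is proved, stated in full; the proofs are below) =====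
def Claim_equal_getBestRoom : Prop := ∀ (mat : List (List Int)) (nrLines : Int) (nrCols : Int) (line : Int) (col : Int), Dom_getBestRoom mat nrLines nrCols line col → Pre_getBestRoom mat nrLines nrCols line col → Spec_getBestRoom mat nrLines nrCols line col (getBestRoom mat nrLines nrCols line col)

-- ===== LEMMAS AND PROOFS =====

-- generic first-failure scanner over rows; both sides reduce to it
def scanP (p : Int → Bool) (cap r : Int) : Int :=
  if r < cap ∧ p r then scanP p cap (r + 1) else r
termination_by (cap - r).toNat
decreasing_by omega

theorem scanP_unfold (p : Int → Bool) (cap r : Int) :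
    scanP p cap r = if r < cap ∧ p r then scanP p cap (r + 1) else r := by rw [scanP]

theorem scanP_ge (p : Int → Bool) (cap r : Int) : r ≤ scanP p cap r := by
  rw [scanP]
  split
  · exact le_trans (by omega) (scanP_ge p cap (r + 1))
  · exact le_refl r
termination_by (cap - r).toNat
decreasing_by omega

theorem scanP_le (p : Int → Bool) (cap r : Int) : scanP p cap r ≤ max r cap := by
  rw [scanP]
  split
  · have := scanP_le p cap (r + 1); omega
  · omega
termination_by (cap - r).toNat
decreasing_by omega

theorem scanP_min (p q : Int → Bool) (cap r : Int) :
    scanP (fun x => p x && q x) cap r = min (scanP p cap r) (scanP q cap r) := by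
  rw [scanP_unfold (fun x => p x && q x) cap r, scanP_unfold p cap r, scanP_unfold q cap r]
  have g1 := scanP_ge p cap (r + 1)
  have g2 := scanP_ge q cap (r + 1)
  by_cases hr : r < cap
  · by_cases hp : p r = true
    · by_cases hq : q r = true
      · rw [if_pos ⟨hr, by rw [hp, hq]; rfl⟩, if_pos ⟨hr, hp⟩, if_pos ⟨hr, hq⟩]
        exact scanP_min p q cap (r + 1)
      · rw [if_neg (by simp [hq]), if_pos ⟨hr, hp⟩, if_neg (by simp [hq])]
        omega
    · by_cases hq : q r = true
      · rw [if_neg (by simp [hp]), if_neg (by simp [hp]), if_pos ⟨hr, hq⟩]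
        omega
      · rw [if_neg (by simp [hp]), if_neg (by simp [hp]), if_neg (by simp [hq])]
        omega
  · rw [if_neg (by omega), if_neg (by omega), if_neg (by omega)]
    omega
termination_by (cap - r).toNat
decreasing_by omega

theorem scanP_congr (p q : Int → Bool) (cap r : Int) (h : ∀ x, r ≤ x → x < cap → p x = q x) :
    scanP p cap r = scanP q cap r := by
  rw [scanP_unfold p cap r, scanP_unfold q cap r]
  by_cases hr : r < cap
  · rw [show p r = q r from h r le_rfl hr]
    split
    · exact scanP_congr p q cap (r + 1) (fun x hx1 hx2 => h x (by omega) hx2)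
    · rfl
  · rw [if_neg (by omega), if_neg (by omega)]
termination_by (cap - r).toNat
decreasing_by omega

theorem scanDownGo_eq_scanP (mat : List (List Int)) (c cap : Int) :
    ∀ (n : Nat) (r : Int), (cap - r).toNat = n →
      scanDownGo mat c n r = scanP (fun x => decide (cell0 mat x c = 0)) cap r := by
  intro n
  induction n with
  | zero =>
    intro r hr
    rw [scanDownGo, scanP_unfold, if_neg (by omega)]
  | succ n ih =>
    intro r hr
    rw [scanDownGo, scanP_unfold]
    by_cases hz : cell0 mat r c = 0
    · rw [if_pos hz, if_pos ⟨by omega, by simpa using hz⟩]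
      exact ih (r + 1) (by omega)
    · rw [if_neg hz, if_neg (by simp [hz])]

theorem scanDown_eq_scanP (mat : List (List Int)) (c cap r : Int) :
    scanDown mat c cap r = scanP (fun x => decide (cell0 mat x c = 0)) cap r :=
  scanDownGo_eq_scanP mat c cap (cap - r).toNat r rfl

theorem scanDown_ge (mat : List (List Int)) (c cap r : Int) : r ≤ scanDown mat c cap r := by
  rw [scanDown_eq_scanP]; exact scanP_ge _ _ _

-- running-cap identity for A's inner scan
theorem scanP_cap (p : Int → Bool) (m n r : Int) (hmn : m ≤ n) (hrm : r ≤ m) :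
    scanP p m r = min m (scanP p n r) := by
  rw [scanP_unfold p m r]
  conv_rhs => rw [scanP_unfold p n r]
  split
  · rename_i h
    rw [if_pos ⟨by omega, h.2⟩]
    exact scanP_cap p m n (r + 1) hmn (by omega)
  · rename_i h
    by_cases hc : r < n ∧ p r = true
    · have hrm' : r = m := by
        rcases Decidable.not_and_iff_not_or_not.mp h with h1 | h2
        · omega
        · exact absurd hc.2 h2
      rw [if_pos hc]
      have := scanP_ge p n (r + 1)
      omega
    · rw [if_neg hc]; omega
termination_by (m - r).toNat
decreasing_by omega

-- A's inner scan with a running cap m, through the full-height scan (JInv = shapes m can take)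
def JInv (line nrLines m : Int) : Prop :=
  (line ≤ m ∧ m ≤ nrLines) ∨ m = nrLines ∨ m = line

theorem scanP_step (p : Int → Bool) (line nrLines m : Int) (hJ : JInv line nrLines m) :
    scanP p m line = max line (min m (scanP p nrLines line)) := by
  by_cases hlm : line < m
  · have hmn : m ≤ nrLines := by
      rcases hJ with h | h | h
      · exact h.2
      · omega
      · omega
    rw [scanP_cap p m nrLines line hmn (by omega)]
    have h1 := scanP_ge p nrLines line
    omega
  · rw [scanP_unfold p m line, if_neg (by omega)]
    have h1 := scanP_ge p nrLines line
    omega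

-- Bool predicate 'row r has its first w cells (from col) zero'
def allZ (mat : List (List Int)) (col : Int) (w : Nat) (r : Int) : Bool :=
  decide (∀ i : Nat, i < w → cell0 mat r (col + (i : Int)) = 0)

-- canonical per-width height
def hgtS (mat : List (List Int)) (nrLines line col : Int) (w : Nat) : Int :=
  scanP (allZ mat col w) nrLines line

theorem allZ_succ (mat : List (List Int)) (col : Int) (w : Nat) (r : Int) :
    allZ mat col (w + 1) r = (allZ mat col w r && decide (cell0 mat r (col + (w : Int)) = 0)) := by
  have h : (∀ i : Nat, i < w + 1 → cell0 mat r (col + (i : Int)) = 0) ↔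
      ((∀ i : Nat, i < w → cell0 mat r (col + (i : Int)) = 0) ∧ cell0 mat r (col + (w : Int)) = 0) := by
    constructor
    · intro h; exact ⟨fun i hi => h i (by omega), h w (by omega)⟩
    · rintro ⟨h1, h2⟩ i hi
      rcases Nat.lt_succ_iff_lt_or_eq.mp hi with hi | rfl
      · exact h1 i hi
      · exact h2
  simp only [allZ, h, Bool.decide_and]

theorem hgtS_one (mat : List (List Int)) (nrLines line col : Int) :
    hgtS mat nrLines line col 1 = scanDown mat col nrLines line := by
  rw [scanDown_eq_scanP]
  exact scanP_congr _ _ _ _ (fun x _ _ => by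
    simp only [allZ, Nat.lt_one_iff, forall_eq, Nat.cast_zero, add_zero])

theorem hgtS_succ (mat : List (List Int)) (nrLines line col : Int) (w : Nat) :
    hgtS mat nrLines line col (w + 1) =
      min (hgtS mat nrLines line col w) (scanDown mat (col + (w : Int)) nrLines line) := by
  rw [scanDown_eq_scanP, hgtS, hgtS,
    scanP_congr (allZ mat col (w + 1))
      (fun x => allZ mat col w x && decide (cell0 mat x (col + (w : Int)) = 0)) nrLines line
      (fun x _ _ => allZ_succ mat col w x)]
  exact scanP_min _ _ _ _

theorem hgtS_ge (mat : List (List Int)) (nrLines line col : Int) (w : Nat) :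
    line ≤ hgtS mat nrLines line col w := scanP_ge _ _ _

theorem hgtS_JInv (mat : List (List Int)) (nrLines line col : Int) (w : Nat) :
    JInv line nrLines (hgtS mat nrLines line col w) := by
  by_cases h : line < nrLines
  · left
    refine ⟨hgtS_ge _ _ _ _ _, ?_⟩
    have h2 : hgtS mat nrLines line col w ≤ max line nrLines := scanP_le (allZ mat col w) nrLines line
    omega
  · right; right
    rw [hgtS, scanP, if_neg (by omega)]

-- ---- row-run characterisations (through the generic scanner) ----

theorem scanP_stop (p : Int → Bool) (cap c : Int) :
    ¬ (scanP p cap c < cap ∧ p (scanP p cap c) = true) := by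
  rw [scanP_unfold]
  split
  · exact scanP_stop p cap (c + 1)
  · rename_i h
    intro hc
    exact h hc
termination_by (cap - c).toNat
decreasing_by omega

theorem scanP_ge_iff (p : Int → Bool) (cap : Int) (c : Int) (k : Nat) :
    c + (k : Int) ≤ scanP p cap c ↔
      ∀ i : Nat, i < k → (c + (i : Int) < cap ∧ p (c + (i : Int)) = true) := by
  induction k generalizing c with
  | zero =>
    simp only [Nat.cast_zero, add_zero]
    exact ⟨fun _ i hi => absurd hi (Nat.not_lt_zero i), fun _ => scanP_ge p cap c⟩
  | succ k ih =>
    rw [scanP_unfold]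
    by_cases hc : c < cap ∧ p c = true
    · rw [if_pos hc]
      constructor
      · intro h i hi
        cases i with
        | zero => simpa using hc
        | succ j =>
          have h' : (c + 1) + (k : Int) ≤ scanP p cap (c + 1) := by
            push_cast at h; omega
          have := (ih (c + 1)).mp h' j (Nat.lt_of_succ_lt_succ hi)
          refine ⟨by push_cast; omega, ?_⟩
          have h2 := this.2
          rw [show (c + 1) + (j : Int) = c + ((j : Nat) + 1 : Nat) by push_cast; ring] at h2
          exact h2
      · intro h
        have hall : ∀ i : Nat, i < k → ((c + 1) + (i : Int) < cap ∧ p ((c + 1) + (i : Int)) = true) := by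
          intro i hi
          have := h (i + 1) (Nat.succ_lt_succ hi)
          refine ⟨by push_cast at this ⊢; omega, ?_⟩
          have h2 := this.2
          rw [show c + ((i : Nat) + 1 : Nat) = (c + 1) + (i : Int) by push_cast; ring] at h2
          exact h2
        have := (ih (c + 1)).mpr hall
        push_cast
        omega
    · rw [if_neg hc]
      constructor
      · intro h
        exfalso
        push_cast at h
        omega
      · intro h
        have := h 0 (Nat.succ_pos k)
        exact absurd ⟨by simpa using this.1, by simpa using this.2⟩ hc

theorem rowRunGo_eq_scanP (mat : List (List Int)) (r cap : Int) :
    ∀ (n : Nat) (c : Int), (cap - c).toNat = n →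
      rowRunGo mat r n c = scanP (fun x => decide (cell0 mat r x = 0)) cap c := by
  intro n
  induction n with
  | zero =>
    intro c hc
    rw [rowRunGo, scanP_unfold, if_neg (by omega)]
  | succ n ih =>
    intro c hc
    rw [rowRunGo, scanP_unfold]
    by_cases hz : cell0 mat r c = 0
    · rw [if_pos hz, if_pos ⟨by omega, by simpa using hz⟩]
      exact ih (c + 1) (by omega)
    · rw [if_neg hz, if_neg (by simp [hz])]

theorem rowRun_eq_scanP (mat : List (List Int)) (nrCols col r : Int) :
    rowRun mat nrCols col r = scanP (fun x => decide (cell0 mat r x = 0)) nrCols col - col := by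
  rw [rowRun, rowRunGo_eq_scanP mat r nrCols (nrCols - col).toNat col rfl]

-- rowRun r ≥ w ↔ allZ w r (when col + w ≤ nrCols)
theorem rowRun_ge_iff_allZ (mat : List (List Int)) (nrCols col r : Int) (w : Nat)
    (hwc : col + (w : Int) ≤ nrCols) :
    ((w : Int) ≤ rowRun mat nrCols col r) ↔ allZ mat col w r = true := by
  rw [rowRun_eq_scanP, allZ, decide_eq_true_eq]
  rw [show ((w : Int) ≤ scanP (fun x => decide (cell0 mat r x = 0)) nrCols col - col) ↔
      (col + (w : Int) ≤ scanP (fun x => decide (cell0 mat r x = 0)) nrCols col) by omega]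
  rw [scanP_ge_iff]
  constructor
  · intro h i hi
    have := (h i hi).2
    simpa using this
  · intro h i hi
    have hiw : (i : Int) < (w : Int) := by exact_mod_cast hi
    exact ⟨by omega, by simpa using h i hi⟩

-- leading count of entries ≥ w
def lc : List Int → Int → Nat
  | [], _ => 0
  | x :: t, w => if w ≤ x then 1 + lc t w else 0

theorem lc_le_length (L : List Int) (w : Int) : lc L w ≤ L.length := by
  induction L with
  | nil => simp [lc]
  | cons x t ih =>
    simp only [lc, List.length_cons]
    split <;> omega

theorem lc_mono (L : List Int) (w w' : Int) (h : w ≤ w') : lc L w' ≤ lc L w := by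
  induction L with
  | nil => simp [lc]
  | cons x t ih =>
    simp only [lc]
    split <;> split <;> omega

-- the transposition: first row failing width w  =  line + leading count of runs ≥ w
theorem scanP_allZ_eq_lc (mat : List (List Int)) (nrLines nrCols col : Int) (w : Nat)
    (hw1 : 1 ≤ w) (hwc : col + (w : Int) ≤ nrCols) :
    ∀ (n : Nat) (r : Int), (nrLines - r).toNat = n →
      scanP (allZ mat col w) nrLines r =
        r + (lc (collectRuns mat nrCols col n r) (w : Int) : Int) := by
  intro n
  induction n with
  | zero =>
    intro r hn
    rw [scanP_unfold, if_neg (by omega), collectRuns]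
    simp [lc]
  | succ n ih =>
    intro r hn
    have hr : r < nrLines := by omega
    rw [scanP_unfold, collectRuns]
    by_cases hz : allZ mat col w r = true
    · rw [if_pos ⟨hr, hz⟩]
      have hge : (w : Int) ≤ rowRun mat nrCols col r := (rowRun_ge_iff_allZ mat nrCols col r w hwc).mpr hz
      have hne : ¬ rowRun mat nrCols col r = 0 := by
        intro h0; rw [h0] at hge; exact absurd hge (by exact_mod_cast (by omega : ¬ ((w:Int) ≤ 0)))
      simp only [if_neg hne]
      simp only [lc, if_pos hge]
      have := ih (r + 1) (by omega)
      push_cast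
      omega
    · rw [if_neg (by intro hc; exact hz hc.2)]
      have hlt : rowRun mat nrCols col r < (w : Int) := by
        by_contra hge
        exact hz ((rowRun_ge_iff_allZ mat nrCols col r w hwc).mp (by omega))
      by_cases h0 : rowRun mat nrCols col r = 0
      · simp only [if_pos h0]; simp [lc]
      · simp only [if_neg h0]
        simp only [lc]
        rw [if_neg (by omega : ¬ ((w : Int) ≤ rowRun mat nrCols col r))]
        simp

-- hgtS at w ≥ 1 equals line + lc runs w
theorem hgtS_eq_lc (mat : List (List Int)) (nrLines nrCols line col : Int) (w : Nat)
    (hw1 : 1 ≤ w) (hwc : col + (w : Int) ≤ nrCols) :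
    hgtS mat nrLines line col w =
      line + (lc (collectRuns mat nrCols col (nrLines - line).toNat line) (w : Int) : Int) :=
  scanP_allZ_eq_lc mat nrLines nrCols col w hw1 hwc (nrLines - line).toNat line rfl

-- ---- pm: prefix minima ----

theorem length_buildPM (t : List Int) (m : Option Int) : (buildPM t m).length = t.length := by
  induction t generalizing m with
  | nil => rfl
  | cons x t ih => simp [buildPM, ih]

theorem lc_buildPM_some (t : List Int) (m w : Int) :
    lc (buildPM t (some m)) w = if w ≤ m then lc t w else 0 := by
  induction t generalizing m with
  | nil => simp [buildPM, lc]
  | cons x t ih =>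
    simp only [buildPM, lc]
    by_cases hm : w ≤ m
    · by_cases hx : w ≤ x
      · rw [if_pos (le_min hm hx), ih, if_pos (le_min hm hx), if_pos hm, if_pos hx]
      · rw [if_neg (by omega), if_pos hm, if_neg hx]
    · rw [if_neg (by omega), if_neg hm]

theorem lc_buildPM (t : List Int) (w : Int) : lc (buildPM t none) w = lc t w := by
  cases t with
  | nil => rfl
  | cons x t =>
    simp only [buildPM, lc]
    by_cases hx : w ≤ x
    · rw [if_pos hx, if_pos hx, lc_buildPM_some, if_pos hx]
    · rw [if_neg hx, if_neg hx]

theorem buildPM_le (t : List Int) (m : Int) : ∀ y ∈ buildPM t (some m), y ≤ m := by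
  induction t generalizing m with
  | nil => simp [buildPM]
  | cons x t ih =>
    simp only [buildPM, List.mem_cons]
    rintro y (rfl | hy)
    · exact min_le_left _ _
    · exact le_trans (ih (min m x) y hy) (min_le_left _ _)

theorem buildPM_pairwise (t : List Int) (m : Option Int) :
    (buildPM t m).Pairwise (fun a b => b ≤ a) := by
  induction t generalizing m with
  | nil => simp [buildPM]
  | cons x t ih =>
    simp only [buildPM]
    exact List.pairwise_cons.mpr ⟨buildPM_le t _, ih _⟩

-- positional facts about lc on an antitone list
theorem lc_pos_ge (L : List Int) (w : Int) (i : Nat) (hi : i < lc L w) :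
    w ≤ (L[i]?).getD 0 := by
  induction L generalizing i with
  | nil => simp [lc] at hi
  | cons x t ih =>
    simp only [lc] at hi
    by_cases hx : w ≤ x
    · rw [if_pos hx] at hi
      cases i with
      | zero => simpa using hx
      | succ j => simpa using ih j (by omega)
    · rw [if_neg hx] at hi; omega

theorem lc_pos_lt (L : List Int) (w : Int) (hL : L.Pairwise (fun a b => b ≤ a)) (i : Nat)
    (hi1 : lc L w ≤ i) (hi2 : i < L.length) : (L[i]?).getD 0 < w := by
  induction L generalizing i with
  | nil => simp at hi2
  | cons x t ih =>
    have hpw := List.pairwise_cons.mp hL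
    simp only [lc] at hi1
    by_cases hx : w ≤ x
    · rw [if_pos hx] at hi1
      cases i with
      | zero => omega
      | succ j => simpa using ih hpw.2 j (by omega) (by simpa using hi2)
    · cases i with
      | zero => simpa using by omega
      | succ j =>
        have hj : t[j]?.getD 0 ≤ x := by
          have hlen : j < t.length := by simpa using hi2
          have := hpw.1 _ (List.getElem_mem hlen)
          simpa [List.getElem?_eq_getElem hlen] using this
        simpa using by omega

theorem shrinkGo_eq_lc (pm : List Int) (w : Int) (hpm : pm.Pairwise (fun a b => b ≤ a)) :
    ∀ (n : Nat) (d : Int), d.toNat = n → (lc pm w : Int) ≤ d → d ≤ (pm.length : Int) →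
      shrinkGo pm w n d = (lc pm w : Int) := by
  intro n
  induction n with
  | zero =>
    intro d hn h1 h2
    rw [shrinkGo]
    omega
  | succ n ih =>
    intro d hn h1 h2
    rw [shrinkGo]
    by_cases he : (lc pm w : Int) = d
    · rw [if_neg ?_]
      · omega
      · rintro ⟨hd, hlt⟩
        have hidx : (d - 1) = ((d - 1).toNat : Int) := by omega
        rw [hidx, PySem.List.pyGet?_natCast] at hlt
        have := lc_pos_ge pm w (d - 1).toNat (by omega)
        omega
    · rw [if_pos ?_]
      · exact ih (d - 1) (by omega) (by omega) (by omega)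
      · refine ⟨by omega, ?_⟩
        have hidx : (d - 1) = ((d - 1).toNat : Int) := by omega
        rw [hidx, PySem.List.pyGet?_natCast]
        exact lc_pos_lt pm w hpm (d - 1).toNat (by omega) (by omega)

theorem shrink_eq_lc (pm : List Int) (w : Int) (hpm : pm.Pairwise (fun a b => b ≤ a)) (d : Int)
    (h1 : (lc pm w : Int) ≤ d) (h2 : d ≤ (pm.length : Int)) :
    shrink pm w d = (lc pm w : Int) :=
  shrinkGo_eq_lc pm w hpm d.toNat d rfl h1 h2

-- ---- the common selection fold ----

def sel (line col : Int) : List (Int × Int) → Option Int → Option (Int × Int × Int × Int) →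
    (Option (Int × Int × Int × Int)) × Option Int
  | [], best, room => (room, best)
  | (h, c) :: t, best, room =>
    let s := getScoreL (h - line) (c - col + 1)
    if (match best with | none => true | some b => decide (s > b)) then
      sel line col t (some s) (some (line, col, h - 1, c))
    else
      sel line col t best room

-- A's loop as sel over its (running-cap height, column) trace
def mseq (mat : List (List Int)) (line : Int) : Int → List Int → List (Int × Int)
  | _, [] => []
  | m, c :: t =>
    if cell0 mat line c ≠ 0 then []
    else
      let m' := scanDown mat c m line
      (m', c) :: mseq mat line m' t

theorem loopA_as_sel (mat : List (List Int)) (line col : Int) (cs : List Int) (m : Int)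
    (best : Option Int) (room : Option (Int × Int × Int × Int)) :
    loopA mat line col cs m best room = sel line col (mseq mat line m cs) best room := by
  induction cs generalizing m best room with
  | nil => rfl
  | cons c t ih =>
    simp only [loopA, mseq]
    by_cases hc : cell0 mat line c ≠ 0
    · rw [if_pos hc, if_pos hc]; rfl
    · rw [if_neg hc, if_neg hc]
      rcases best with _ | b
      · simp only [sel]
        rw [if_pos (by simp), if_pos (by simp)]
        exact ih _ _ _
      · simp only [sel]
        by_cases hs : decide (getScoreL (scanDown mat c m line - line) (c - col + 1) > b) = true
        · rw [if_pos hs, if_pos hs]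
          exact ih _ _ _
        · rw [if_neg hs, if_neg hs]
          exact ih _ _ _

-- B's loop as sel over its (depth pointer, width) trace
def dseq (line col : Int) (pm : List Int) : Int → List Int → List (Int × Int)
  | _, [] => []
  | d, w :: ws =>
    let d' := shrink pm w d
    (line + d', col + w - 1) :: dseq line col pm d' ws

theorem loopB_as_sel (line col : Int) (pm : List Int) (ws : List Int) (d : Int)
    (best : Option Int) (room : Option (Int × Int × Int × Int)) :
    loopB line col pm ws d best room = sel line col (dseq line col pm d ws) best room := by
  induction ws generalizing d best room with
  | nil => rfl
  | cons w t ih =>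
    simp only [loopB, dseq, sel]
    rw [show line + shrink pm w d - line = shrink pm w d by ring,
        show col + w - 1 - col + 1 = w by ring]
    rcases best with _ | b
    · rw [if_pos (by simp), if_pos (by simp)]
      exact ih _ _ _
    · by_cases hs : decide (getScoreL (shrink pm w d) w > b) = true
      · rw [if_pos hs, if_pos hs]
        exact ih _ _ _
      · rw [if_neg hs, if_neg hs]
        exact ih _ _ _

-- dseq evaluated: each width w reads off line + lc pm w
theorem dseq_eq_map (line col : Int) (pm : List Int) (hpm : pm.Pairwise (fun a b => b ≤ a))
    (ws : List Int) (hws : ws.Pairwise (· ≤ ·)) (d : Int)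
    (hd1 : ∀ w ∈ ws, (lc pm w : Int) ≤ d) (hd2 : d ≤ (pm.length : Int)) :
    dseq line col pm d ws = ws.map (fun w => (line + (lc pm w : Int), col + w - 1)) := by
  induction ws generalizing d with
  | nil => rfl
  | cons w t ih =>
    have hpw := List.pairwise_cons.mp hws
    simp only [dseq, List.map_cons]
    rw [shrink_eq_lc pm w hpm d (hd1 w (List.mem_cons_self)) hd2]
    congr 1
    exact ih hpw.2 _ (fun w' hw' => by
        have := lc_mono pm w w' (hpw.1 w' hw')
        omega)
      (by have := lc_le_length pm w; omega)

-- A's trace evaluated: column col+k carries the canonical height hgtS (k+1)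
theorem mseq_eq_map (mat : List (List Int)) (nrLines nrCols line col : Int)
    (hcol : col < nrCols) :
    ∀ (k : Nat) (m : Int),
      (k : Int) ≤ rowRun mat nrCols col line →
      ((m = nrLines ∧ k = 0) ∨ (m = hgtS mat nrLines line col k ∧ 1 ≤ k)) →
      mseq mat line m (PySem.List.pyRange (col + (k : Int)) nrCols 1) =
        (PySem.List.pyRange ((k : Int) + 1) (rowRun mat nrCols col line + 1) 1).map
          (fun w => (hgtS mat nrLines line col w.toNat, col + w - 1)) := by
  intro k
  set W : Int := rowRun mat nrCols col line with hW
  intro m hk hm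
  by_cases hkW : (k : Int) < W
  · -- column col+k is still inside the top zero run
    have hre : W = scanP (fun x => decide (cell0 mat line x = 0)) nrCols col - col := by
      rw [hW, rowRun_eq_scanP]
    have hWnn : col + W ≤ nrCols := by
      have h1 := scanP_le (fun x => decide (cell0 mat line x = 0)) nrCols col
      omega
    have hWge : col + W ≤ scanP (fun x => decide (cell0 mat line x = 0)) nrCols col := by omega
    have hWk : (W.toNat : Int) = W := by
      have := scanP_ge (fun x => decide (cell0 mat line x = 0)) nrCols col
      omega
    have hallW := (scanP_ge_iff (fun x => decide (cell0 mat line x = 0)) nrCols col W.toNat).mp (by rw [hWk]; omega)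
    have hzk : cell0 mat line (col + (k : Int)) = 0 := by
      have := (hallW k (by omega)).2
      simpa using this
    have hlt : col + (k : Int) < nrCols := by omega
    rw [PySem.List.pyRange_one_cons (show col + (k : Int) < nrCols by omega)]
    simp only [mseq]
    rw [if_neg (fun hne => hne hzk)]
    have hm' : scanDown mat (col + (k : Int)) m line = hgtS mat nrLines line col (k + 1) := by
      rcases hm with ⟨hm1, hk0⟩ | ⟨hm1, hk1⟩
      · rw [hm1, hk0]
        simp only [Nat.cast_zero, add_zero, Nat.zero_add]
        exact (hgtS_one mat nrLines line col).symm
      · rw [hm1]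
        rw [scanDown_eq_scanP]
        rw [scanP_step (fun x => decide (cell0 mat x (col + (k : Int)) = 0)) line nrLines
          (hgtS mat nrLines line col k) (hgtS_JInv mat nrLines line col k)]
        rw [← scanDown_eq_scanP, hgtS_succ]
        have h1 := hgtS_ge mat nrLines line col k
        have h2 := scanDown_ge mat (col + (k : Int)) nrLines line
        omega
    rw [hm']
    rw [show (PySem.List.pyRange ((k : Int) + 1) (W + 1) 1) =
        ((k : Int) + 1) :: PySem.List.pyRange ((k : Int) + 1 + 1) (W + 1) 1 from
      PySem.List.pyRange_one_cons (by omega)]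
    simp only [List.map_cons]
    rw [show ((k : Int) + 1).toNat = k + 1 from by omega,
        show col + ((k : Int) + 1) - 1 = col + (k : Int) from by ring]
    have htail := mseq_eq_map mat nrLines nrCols line col hcol (k + 1)
        (hgtS mat nrLines line col (k + 1)) (by push_cast; omega) (Or.inr ⟨rfl, by omega⟩)
    rw [← hW] at htail
    rw [show col + (k : Int) + 1 = col + ((k : Nat) + 1 : Nat) by push_cast; ring,
        show (k : Int) + 1 + 1 = (((k : Nat) + 1 : Nat) : Int) + 1 by push_cast; ring]
    rw [htail]
  · -- the top zero run is exhausted: both sides are empty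
    have hke : (k : Int) = W := by omega
    rw [show (PySem.List.pyRange ((k : Int) + 1) (W + 1) 1) = [] from
      PySem.List.pyRange_one_eq_nil (by omega), List.map_nil]
    have hstop := scanP_stop (fun x => decide (cell0 mat line x = 0)) nrCols col
    have hgo : scanP (fun x => decide (cell0 mat line x = 0)) nrCols col = col + W := by
      rw [hW, rowRun_eq_scanP]
      ring
    rw [hgo] at hstop
    by_cases hend : col + (k : Int) < nrCols
    · rw [PySem.List.pyRange_one_cons (by omega)]
      simp only [mseq]
      rw [if_pos ?_]
      intro hz
      rw [hke] at hz
      exact hstop ⟨by omega, by simpa using hz⟩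
    · rw [PySem.List.pyRange_one_eq_nil (by omega)]
      rfl
termination_by k => (rowRun mat nrCols col line + 1 - k).toNat
decreasing_by push_cast; omega

-- widths 1..W are sorted
theorem pyRange_pairwise_le (a b : Int) : (PySem.List.pyRange a b 1).Pairwise (· ≤ ·) :=
  (PySem.List.pairwise_lt_pyRange_one a b).imp (fun h => le_of_lt h)

-- ===== VERDICT (by name: the statement is the Claim_ definition above) =====
theorem getBestRoom_spec : Claim_equal_getBestRoom := by
  intro mat nrLines nrCols line col _ hpre
  unfold Spec_getBestRoom getBestRoom getBestRoom_alt
  by_cases hc : col ≥ nrCols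
  · rw [if_pos hc, PySem.List.pyRange_one_eq_nil (by omega)]
    rfl
  · rw [if_neg hc]
    have hcol : col < nrCols := by omega
    set W : Int := rowRun mat nrCols col line with hW
    set runs : List Int := collectRuns mat nrCols col (nrLines - line).toNat line with hruns
    set pm : List Int := buildPM runs none with hpm
    have hre : W = scanP (fun x => decide (cell0 mat line x = 0)) nrCols col - col := by
      rw [hW, rowRun_eq_scanP]
    have hWnn : 0 ≤ W := by
      have := scanP_ge (fun x => decide (cell0 mat line x = 0)) nrCols col
      omega
    have hWle : col + W ≤ nrCols := by
      have := scanP_le (fun x => decide (cell0 mat line x = 0)) nrCols col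
      omega
    have hlen : (pm.length : Int) = (runs.length : Int) := by
      rw [hpm, length_buildPM]
    rw [loopA_as_sel, loopB_as_sel]
    congr 1
    -- both traces are the same list
    have hA := mseq_eq_map mat nrLines nrCols line col hcol 0 nrLines (by omega) (Or.inl ⟨rfl, rfl⟩)
    rw [← hW] at hA
    simp only [Nat.cast_zero, add_zero, zero_add] at hA
    rw [hA]
    rw [dseq_eq_map line col pm (buildPM_pairwise runs none) _ (pyRange_pairwise_le 1 (W + 1)) _
        (fun w hw => by
          have h1 := lc_le_length pm w
          have h2 : (buildPM runs none).length = pm.length := by rw [hpm]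
          omega)
        (by
          have h2 : (buildPM runs none).length = pm.length := by rw [hpm]
          omega)]
    apply List.map_congr_left
    intro w hw
    have hwb := PySem.List.mem_pyRange_one.mp hw
    have hw1 : 1 ≤ w := hwb.1
    have hwW : w ≤ W := by omega
    have hwt : ((w.toNat : Nat) : Int) = w := by omega
    have h1w : 1 ≤ w.toNat := by omega
    have := hgtS_eq_lc mat nrLines nrCols line col w.toNat h1w (by rw [hwt]; omega)
    rw [← hruns] at this
    rw [this, lc_buildPM, hwt]
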